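-- pv_equiv track=rewrite | github.com/Maxeonyx/yahtzee | yahtzee.py | check_valid_keep
-- ===== SOURCE A (Python) =====
-- def check_valid_keep(kept_dice, rolled_dice):
--     kept_dice = list(kept_dice)
--     rolled_dice = list(rolled_dice)
--     try:
--         for die in kept_dice:
--             rolled_dice.pop(rolled_dice.index(die))
--     except ValueError:
--         return False
--     return True
-- ===== SOURCE B (Python) =====
-- def check_valid_keep(kept_dice, rolled_dice):
--     need = {}
--     for d in kept_dice:
--         need[d] = need.get(d, 0) + 1
--     have = {}
--     for d in rolled_dice:
--         have[d] = have.get(d, 0) + 1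
--     return all(have.get(d, 0) >= c for d, c in need.items())
-- ===== Notes on version B (the rewrite author's own statement) =====
-- stated objective: alternative
-- what changed: Replaced the repeated list.index/pop scan-and-remove loop by building two one-pass multiplicity counters (dicts) and comparing counts entrywise; A's destructive early-exit loop can beat it when a kept die is missing early, so no speed is claimed.
import Mathlib
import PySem

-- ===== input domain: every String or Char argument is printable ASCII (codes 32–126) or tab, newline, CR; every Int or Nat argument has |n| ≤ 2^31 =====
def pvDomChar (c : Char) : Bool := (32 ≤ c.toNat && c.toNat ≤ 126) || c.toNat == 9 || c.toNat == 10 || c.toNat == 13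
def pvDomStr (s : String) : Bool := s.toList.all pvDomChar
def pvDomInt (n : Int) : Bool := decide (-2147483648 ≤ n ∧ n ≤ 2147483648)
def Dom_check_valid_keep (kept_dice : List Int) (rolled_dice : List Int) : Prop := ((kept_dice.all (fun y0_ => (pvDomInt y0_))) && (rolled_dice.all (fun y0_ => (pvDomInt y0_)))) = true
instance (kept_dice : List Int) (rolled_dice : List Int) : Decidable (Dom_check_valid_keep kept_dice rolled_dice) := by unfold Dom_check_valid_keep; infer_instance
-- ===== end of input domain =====

-- B replaces A's repeated list.index/pop scan-and-remove loop with two one-pass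
-- multiplicity counters compared entrywise (objective: alternative algorithm).

-- ===== PORT A =====
-- the 'for die in kept_dice: rolled_dice.pop(rolled_dice.index(die))' loop, with the
-- try/except ValueError returning False when .index fails
def checkKeepLoopA : List Int → List Int → Bool
  | [], _ => true
  | die :: rest, rolled =>
    match PySem.List.index? rolled die with
    | none => false                              -- .index raises ValueError → return False
    | some i =>
      match PySem.List.pop? rolled (i : Int) with
      | none => false                            -- unreachable (index is in range)
      | some (_, rolled') => checkKeepLoopA rest rolled'

def check_valid_keep (kept_dice : List Int) (rolled_dice : List Int) : Bool :=
  checkKeepLoopA kept_dice rolled_dice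

-- ===== PORT B =====
def check_valid_keep_alt (kept_dice : List Int) (rolled_dice : List Int) : Bool :=
  let need : PySem.Dict Int Int :=
    kept_dice.foldl (fun d x => d.insert x (d.getD x 0 + 1)) PySem.Dict.empty
  let have_ : PySem.Dict Int Int :=
    rolled_dice.foldl (fun d x => d.insert x (d.getD x 0 + 1)) PySem.Dict.empty
  need.items.all (fun p => have_.getD p.1 0 ≥ p.2)

-- ===== PRECONDITION & SPEC =====
def Spec_check_valid_keep (kept_dice : List Int) (rolled_dice : List Int) (out : Bool) : Prop := out = check_valid_keep_alt kept_dice rolled_dice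
instance (kept_dice : List Int) (rolled_dice : List Int) (out : Bool) : Decidable (Spec_check_valid_keep kept_dice rolled_dice out) := by unfold Spec_check_valid_keep; infer_instance

-- ===== CLAIM (what is proved, stated in full; the proofs are below) =====
def Claim_equal_check_valid_keep : Prop := ∀ (kept_dice : List Int) (rolled_dice : List Int), Dom_check_valid_keep kept_dice rolled_dice → Spec_check_valid_keep kept_dice rolled_dice (check_valid_keep kept_dice rolled_dice)

-- ===== LEMMAS AND PROOFS =====

theorem eraseIdx_mid (pre suf : List Int) (k : Int) :
    (pre ++ k :: suf).eraseIdx pre.length = pre ++ suf := by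
  induction pre with
  | nil => simp
  | cons a t ih => simpa [List.eraseIdx] using ih

-- A's loop succeeds iff kept is a sub-multiset of rolled (count-wise).
theorem checkKeepLoopA_iff (ks : List Int) : ∀ (r : List Int),
    checkKeepLoopA ks r = true ↔ ∀ d, ks.count d ≤ r.count d := by
  induction ks with
  | nil => intro r; simp [checkKeepLoopA]
  | cons k rest ih =>
    intro r
    unfold checkKeepLoopA
    cases h : PySem.List.index? r k with
    | none =>
      have hk : k ∉ r := (PySem.List.index?_eq_none_iff r k).mp h
      have h0 : List.count k r = 0 := List.count_eq_zero.mpr hk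
      constructor
      · intro hfalse; exact absurd hfalse (by simp)
      · intro hall
        have := hall k
        rw [List.count_cons_self, h0] at this
        omega
    | some i =>
      obtain ⟨pre, suf, hr, hlen, hkpre⟩ := (PySem.List.index?_eq_some_iff r k i).mp h
      subst hr
      subst hlen
      have hi : pre.length < (pre ++ k :: suf).length := by simp
      have hpop := PySem.List.pop?_natCast (pre ++ k :: suf) pre.length hi
      simp only [hpop]
      rw [eraseIdx_mid pre suf k, ih (pre ++ suf)]
      constructor
      · intro hall d
        have hd := hall d
        by_cases hdk : d = k
        · subst hdk
          simp only [List.count_append, List.count_cons_self] at hd ⊢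
          omega
        · have e1 : List.count d (k :: rest) = List.count d rest := by
            simp [Ne.symm hdk]
          have e2 : List.count d (k :: suf) = List.count d suf := by
            simp [Ne.symm hdk]
          simp only [List.count_append] at hd ⊢
          rw [e1, e2]
          exact hd
      · intro hall d
        have hd := hall d
        by_cases hdk : d = k
        · subst hdk
          simp only [List.count_append, List.count_cons_self] at hd ⊢
          omega
        · have e1 : List.count d (k :: rest) = List.count d rest := by
            simp [Ne.symm hdk]
          have e2 : List.count d (k :: suf) = List.count d suf := by
            simp [Ne.symm hdk]
          simp only [List.count_append] at hd ⊢
          rw [e1, e2] at hd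
          exact hd

-- B returns true iff kept is a sub-multiset of rolled (count-wise).
theorem alt_iff (ks r : List Int) :
    check_valid_keep_alt ks r = true ↔ ∀ d, ks.count d ≤ r.count d := by
  have hrepr : check_valid_keep_alt ks r =
      ((PySem.Dict.counter ks).items.all
        (fun p => decide ((PySem.Dict.counter r).getD p.1 0 ≥ p.2))) := rfl
  rw [hrepr, PySem.Dict.items_counter]
  simp only [List.all_map, List.all_eq_true, Function.comp]
  constructor
  · intro hall d
    by_cases hd : d ∈ ks
    · have hdm : d ∈ PySem.Set.ofList ks := by rw [PySem.Set.mem_ofList]; exact hd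
      have := hall d hdm
      rw [PySem.Dict.getD_counter] at this
      simp only [ge_iff_le, decide_eq_true_eq] at this
      exact_mod_cast this
    · simp [List.count_eq_zero.mpr hd]
  · intro hall d _
    rw [PySem.Dict.getD_counter]
    simp only [ge_iff_le, decide_eq_true_eq]
    exact_mod_cast hall d

-- ===== VERDICT (by name: the statement is the Claim_ definition above) =====
theorem check_valid_keep_spec : Claim_equal_check_valid_keep := by
  intro ks r _
  unfold Spec_check_valid_keep check_valid_keep
  have h := (checkKeepLoopA_iff ks r).trans (alt_iff ks r).symm
  cases hA : checkKeepLoopA ks r <;> cases hB : check_valid_keep_alt ks r <;> simp_all
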